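-- pv_equiv track=rewrite | github.com/shihono/alphabet2kana | alphabet2kana/alphabet2kana.py | convert
-- ===== SOURCE A (Python) =====
-- from itertools import groupby
--
-- def _convert(text, conv_table):
--     return text.translate(conv_table)
--
-- def convert(text, delimiter, conv_table, target_words):
--     """
--
--     Parameters
--     ----------
--     text :str
--     delimiter : str
--     conv_table : dict
--         convert table
--     target_words : list
--         convert words list
--     Returns
--     -------
--     str
--         convert string
--     """
--     if not delimiter:
--         return _convert(text, conv_table)
--     res = []
--     for k, v in groupby(text, lambda x: x in target_words):
--         t = list(v)
--         if k:
--             res.append(_convert(delimiter.join(t), conv_table))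
--         else:
--             res.extend(t)
--     return "".join(res)
-- ===== SOURCE B (Python) =====
-- def convert(text, delimiter, conv_table, target_words):
--     if not delimiter:
--         return text.translate(conv_table)
--     targets = set(target_words)
--     trans_delim = delimiter.translate(conv_table)
--     parts = []
--     prev_target = False
--     for c in text:
--         if c in targets:
--             if prev_target:
--                 parts.append(trans_delim)
--             parts.append(c.translate(conv_table))
--             prev_target = True
--         else:
--             parts.append(c)
--             prev_target = False
--     return "".join(parts)
-- ===== Notes on version B (the rewrite author's own statement) =====
-- stated objective: alternative
-- what changed: Replaced the groupby-over-runs pass (materialise each run, delimiter.join it, translate the joined chunk) by a single stateful left-to-right scan with a set of targets and a pre-translated delimiter, using the fact that translate distributes over concatenation.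
import Mathlib
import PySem

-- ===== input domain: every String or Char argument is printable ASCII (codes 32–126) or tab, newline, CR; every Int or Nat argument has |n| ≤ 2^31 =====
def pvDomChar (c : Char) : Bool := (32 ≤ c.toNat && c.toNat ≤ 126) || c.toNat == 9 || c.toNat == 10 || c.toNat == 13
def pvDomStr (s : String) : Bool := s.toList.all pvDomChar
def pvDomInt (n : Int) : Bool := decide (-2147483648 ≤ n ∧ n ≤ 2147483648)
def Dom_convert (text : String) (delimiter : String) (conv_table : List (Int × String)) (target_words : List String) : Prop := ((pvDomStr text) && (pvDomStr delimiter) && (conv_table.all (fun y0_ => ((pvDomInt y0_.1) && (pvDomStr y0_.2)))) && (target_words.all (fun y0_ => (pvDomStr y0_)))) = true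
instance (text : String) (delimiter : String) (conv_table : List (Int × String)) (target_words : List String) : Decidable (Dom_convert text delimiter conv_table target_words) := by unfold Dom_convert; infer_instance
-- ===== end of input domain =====

-- B replaces A's groupby-over-runs pass by a single stateful scan with a pre-translated
-- delimiter (objective: alternative decomposition; same observable behaviour).

-- ===== PORT A =====
-- str.translate with an {ord -> str} table, one char (Python builds the result char by char)
def trChar (tbl : List (Int × String)) (c : Char) : List Char :=
  match List.lookup ((c.toNat : Int)) tbl with
  | some s => s.toList
  | none => [c]

-- text.translate(conv_table) over the whole string
def trList (tbl : List (Int × String)) (cs : List Char) : List Char :=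
  cs.flatMap (trChar tbl)

-- itertools.groupby(text, key): consecutive runs with their common key
def pyGroupby (p : Char → Bool) : List Char → List (Bool × List Char)
  | [] => []
  | c :: cs =>
    match pyGroupby p cs with
    | [] => [(p c, [c])]
    | (k, g) :: gs => if p c = k then (k, c :: g) :: gs else (p c, [c]) :: (k, g) :: gs

-- A's loop over the groups; res flattened to chars ("".join at the end)
def aGroups (tbl : List (Int × String)) (dl : List Char) : List (Bool × List Char) → List Char
  | [] => []
  | (k, t) :: gs =>
    (if k then trList tbl (List.intercalate dl (t.map (fun c => [c]))) else t) ++ aGroups tbl dl gs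

def convert (text : String) (delimiter : String) (conv_table : List (Int × String)) (target_words : List String) : String :=
  if delimiter = "" then
    String.mk (trList conv_table text.toList)
  else
    String.mk (aGroups conv_table delimiter.toList
      (pyGroupby (fun c => target_words.contains (String.mk [c])) text.toList))

-- ===== PORT B =====
-- B's single pass: prev_target flag, pre-translated delimiter td
def bLoop (tbl : List (Int × String)) (targets : PySem.Set String) (td : List Char) :
    List Char → Bool → List Char
  | [], _ => []
  | c :: cs, prev =>
    if PySem.Set.contains targets (String.mk [c]) then
      (if prev then td else []) ++ trChar tbl c ++ bLoop tbl targets td cs true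
    else
      c :: bLoop tbl targets td cs false

def convert_alt (text : String) (delimiter : String) (conv_table : List (Int × String)) (target_words : List String) : String :=
  if delimiter = "" then
    String.mk (trList conv_table text.toList)
  else
    String.mk (bLoop conv_table (PySem.Set.ofList target_words)
      (trList conv_table delimiter.toList) text.toList false)

-- ===== PRECONDITION & SPEC =====
def Spec_convert (text : String) (delimiter : String) (conv_table : List (Int × String)) (target_words : List String) (out : String) : Prop := out = convert_alt text delimiter conv_table target_words
instance (text : String) (delimiter : String) (conv_table : List (Int × String)) (target_words : List String) (out : String) : Decidable (Spec_convert text delimiter conv_table target_words out) := by unfold Spec_convert; infer_instance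

-- ===== CLAIM (what is proved, stated in full; the proofs are below) =====
def Claim_equal_convert : Prop := ∀ (text : String) (delimiter : String) (conv_table : List (Int × String)) (target_words : List String), Dom_convert text delimiter conv_table target_words → Spec_convert text delimiter conv_table target_words (convert text delimiter conv_table target_words)

-- ===== LEMMAS AND PROOFS =====

-- membership in the Set equals membership in the original list
theorem set_contains_eq (target_words : List String) (s : String) :
    PySem.Set.contains (PySem.Set.ofList target_words) s = target_words.contains s := by
  by_cases h : s ∈ target_words <;>
    simp [PySem.Set.mem_ofList, h]

-- the first group produced by pyGroupby is keyed by, and starts with, the first char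
theorem pyGroupby_cons (p : Char → Bool) (c : Char) (cs : List Char) :
    ∃ g gs, pyGroupby p (c :: cs) = (p c, c :: g) :: gs := by
  unfold pyGroupby
  rcases h : pyGroupby p cs with _ | ⟨⟨k, g⟩, gs⟩
  · exact ⟨[], [], rfl⟩
  · by_cases hk : p c = k
    · exact ⟨g, gs, by simp [hk]⟩
    · exact ⟨[], (k, g) :: gs, by simp [hk]⟩

-- the prev flag only matters when the next char is a target: it prepends td
theorem bLoop_true (tbl : List (Int × String)) (targets : PySem.Set String) (td : List Char)
    (cs : List Char) :
    bLoop tbl targets td cs true =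
      (match cs with
       | [] => []
       | c :: _ => if PySem.Set.contains targets (String.mk [c]) then td else []) ++
        bLoop tbl targets td cs false := by
  cases cs with
  | nil => rfl
  | cons c cs =>
    simp only [bLoop]
    split <;> simp

-- main invariant: A's fold over the groups equals B's scan started with prev = false
theorem main_lemma (tbl : List (Int × String)) (dl : List Char) (p : Char → Bool)
    (targets : PySem.Set String)
    (hpt : ∀ c, PySem.Set.contains targets (String.mk [c]) = p c)
    (cs : List Char) :
    aGroups tbl dl (pyGroupby p cs) =
      bLoop tbl targets (trList tbl dl) cs false := by
  induction cs with
  | nil => rfl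
  | cons c cs ih =>
    cases hrest : cs with
    | nil =>
      subst hrest
      simp only [pyGroupby, aGroups, bLoop]
      rw [hpt]
      by_cases hc : p c <;> simp [hc, List.intercalate, trList]
    | cons d cs' =>
      subst hrest
      obtain ⟨g, gs, hg⟩ := pyGroupby_cons p d cs'
      have hA : pyGroupby p (c :: d :: cs') =
          if p c = p d then (p d, c :: d :: g) :: gs
          else (p c, [c]) :: (p d, d :: g) :: gs := by
        rw [pyGroupby.eq_def]
        simp only []
        rw [hg]
      have ihg : aGroups tbl dl ((p d, d :: g) :: gs) =
          bLoop tbl targets (trList tbl dl) (d :: cs') false := by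
        rw [← hg]; exact ih
      by_cases hcd : p c = p d
      · rw [hA, if_pos hcd]
        by_cases hd : p d
        · -- both target: run continues; translate distributes over the join
          have hc : p c = true := hcd.trans hd
          simp only [aGroups, hd, if_pos, List.map_cons, List.intercalate] at ihg ⊢
          rw [List.intersperse_cons₂, List.flatten_cons, List.flatten_cons]
          simp only [trList, List.flatMap_append, List.flatMap_cons, List.flatMap_nil,
            List.append_nil] at ihg ⊢
          rw [bLoop, hpt, hc, if_pos rfl, bLoop_true]
          simp only [hpt, hd, if_pos]
          rw [← ihg]
          simp
        · -- both non-target: chars pass through raw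
          have hc' : p c = false := by rw [hcd]; exact eq_false_of_ne_true hd
          have hdf : p d = false := eq_false_of_ne_true hd
          simp only [aGroups, hdf, Bool.false_eq_true, if_false] at ihg ⊢
          rw [bLoop, hpt, hc']
          simp only [Bool.false_eq_true, if_false]
          rw [← ihg]
          simp
      · rw [hA, if_neg hcd]
        by_cases hc : p c
        · -- c target, d not: singleton run, no delimiter follows
          have hd : p d = false := by
            cases hpd : p d
            · rfl
            · exact absurd (hc.trans hpd.symm) hcd
          rw [bLoop, hpt, hc, if_pos rfl, bLoop_true]
          simp only [hpt, hd, Bool.false_eq_true, if_false]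
          rw [hd] at ihg
          rw [aGroups, ihg]
          simp [List.intercalate, trList]
        · have hc' : p c = false := eq_false_of_ne_true hc
          rw [bLoop, hpt, hc']
          simp only [Bool.false_eq_true, if_false]
          rw [aGroups, ihg]
          simp

-- ===== VERDICT (by name: the statement is the Claim_ definition above) =====
theorem convert_spec : Claim_equal_convert := by
  intro text delimiter conv_table target_words _
  unfold Spec_convert convert convert_alt
  by_cases h : delimiter = ""
  · simp [h]
  · rw [if_neg h, if_neg h,
      main_lemma conv_table delimiter.toList _ (PySem.Set.ofList target_words)
        (fun c => set_contains_eq target_words (String.mk [c]))]
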